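-- pv_equiv track=rewrite | github.com/captn3m0/electron-survey | main.py | _detect_arch
-- ===== SOURCE A (Python) =====
-- def _detect_arch(name: str) -> str | None:
--     """Return architecture string inferred from a filename, or None."""
--     lower = name.lower()
--     if any(x in lower for x in ("aarch64", "arm64")):
--         return "arm64"
--     if any(x in lower for x in ("x86_64", "x86-64", "amd64", "x64", "win64")):
--         return "x64"
--     if any(x in lower for x in ("ia32", "i686", "i386", "win32", "x86_32", "32bit")):
--         if "x86_64" not in lower and "x64" not in lower:
--             return "x86"
--     if "universal" in lower:
--         return "universal"
--     if "arm" in lower: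
--         return "arm"
--     return None
-- ===== SOURCE B (Python) =====
-- # Positional multi-pattern scan: walk the filename position by position and keep
-- # the lowest-priority keyword that starts at any position; the label is looked
-- # up by priority at the end.  No early returns, no ordered rule chain.
--
-- _KEYWORDS = [
--     ("aarch64", 0), ("arm64", 0),
--     ("x86_64", 1), ("x86-64", 1), ("amd64", 1), ("x64", 1), ("win64", 1),
--     ("ia32", 2), ("i686", 2), ("i386", 2), ("win32", 2), ("x86_32", 2), ("32bit", 2),
--     ("universal", 3),
--     ("arm", 4),
-- ]
--
-- _ARCHES = ["arm64", "x64", "x86", "universal", "arm"]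
--
--
-- def _detect_arch(name: str) -> str | None:
--     """Return architecture string inferred from a filename, or None."""
--     lower = name.lower()
--     best = None
--     for i in range(len(lower)):
--         for kw, pri in _KEYWORDS:
--             if (best is None or pri < best) and lower.startswith(kw, i):
--                 best = pri
--     return _ARCHES[best] if best is not None else None
-- ===== Notes on version B (the rewrite author's own statement) =====
-- stated objective: alternative
-- what changed: Replaces the ordered chain of whole-string substring-membership checks with a single positional scan: B walks the filename position by position, testing which keywords start at each position and accumulating the minimum keyword priority, then maps that priority to the label; the dead x86 guard disappears because the x64 keywords have strictly lower priority.
import Mathlib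
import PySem

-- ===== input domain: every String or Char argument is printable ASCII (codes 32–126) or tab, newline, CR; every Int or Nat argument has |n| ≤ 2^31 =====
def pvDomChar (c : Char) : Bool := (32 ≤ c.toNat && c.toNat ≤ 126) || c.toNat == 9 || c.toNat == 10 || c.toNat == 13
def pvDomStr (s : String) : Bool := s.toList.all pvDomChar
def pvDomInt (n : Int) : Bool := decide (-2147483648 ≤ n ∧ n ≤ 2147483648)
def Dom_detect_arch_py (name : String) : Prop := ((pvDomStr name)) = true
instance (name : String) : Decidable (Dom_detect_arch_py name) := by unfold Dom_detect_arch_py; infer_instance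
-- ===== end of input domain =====

-- B replaces A's ordered chain of whole-string membership tests by a single positional scan
-- of the filename that accumulates the minimum keyword priority; same results (alternative).


-- ===== PORT A =====
def detect_arch_py (name : String) : Option String :=
  let lower := PySem.Str.lower name
  if PySem.Str.isIn "aarch64" lower || PySem.Str.isIn "arm64" lower then
    some "arm64"
  else if PySem.Str.isIn "x86_64" lower || PySem.Str.isIn "x86-64" lower ||
          PySem.Str.isIn "amd64" lower || PySem.Str.isIn "x64" lower ||
          PySem.Str.isIn "win64" lower then
    some "x64"
  else if (PySem.Str.isIn "ia32" lower || PySem.Str.isIn "i686" lower ||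
           PySem.Str.isIn "i386" lower || PySem.Str.isIn "win32" lower ||
           PySem.Str.isIn "x86_32" lower || PySem.Str.isIn "32bit" lower) &&
          (!PySem.Str.isIn "x86_64" lower && !PySem.Str.isIn "x64" lower) then
    some "x86"
  else if PySem.Str.isIn "universal" lower then
    some "universal"
  else if PySem.Str.isIn "arm" lower then
    some "arm"
  else
    none

-- ===== PORT B =====
-- the (keyword, priority) table of Source B, keywords as char lists
def pvKeywords : List (List Char × Nat) :=
  [("aarch64".toList, 0), ("arm64".toList, 0),
   ("x86_64".toList, 1), ("x86-64".toList, 1), ("amd64".toList, 1), ("x64".toList, 1), ("win64".toList, 1),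
   ("ia32".toList, 2), ("i686".toList, 2), ("i386".toList, 2), ("win32".toList, 2), ("x86_32".toList, 2), ("32bit".toList, 2),
   ("universal".toList, 3),
   ("arm".toList, 4)]

def pvArches : List String := ["arm64", "x64", "x86", "universal", "arm"]

-- 'best is None or pri < best'
def pvBetter (b : Option Nat) (p : Nat) : Bool :=
  match b with
  | none => true
  | some v => p < v

-- Source B's inner for-loop over _KEYWORDS at one position (suffix s)
def pvStep (s : List Char) (b : Option Nat) : Option Nat :=
  pvKeywords.foldl (fun b kp => if pvBetter b kp.2 && PySem.Chars.startswith s kp.1 then some kp.2 else b) b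

def detect_arch_py_alt (name : String) : Option String :=
  let lower := PySem.Str.lower name
  -- for i in range(len(lower)): …  ; lower.startswith(kw, i) with 0 ≤ i is exactly
  -- 'kw is a prefix of the suffix starting at i' (PySem.Chars.startswith on drop i)
  let best := (PySem.List.pyRange 0 (PySem.Str.len lower) 1).foldl
    (fun b i => pvStep (lower.toList.drop i.toNat) b) none
  match best with
  | some b => PySem.List.pyGet? pvArches (Int.ofNat b)   -- _ARCHES[best]
  | none => none

-- ===== PRECONDITION & SPEC =====
def Spec_detect_arch_py (name : String) (out : Option String) : Prop := out = detect_arch_py_alt name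
instance (name : String) (out : Option String) : Decidable (Spec_detect_arch_py name out) := by unfold Spec_detect_arch_py; infer_instance

-- ===== CLAIM (what is proved, stated in full; the proofs are below) =====
def Claim_equal_detect_arch_py : Prop := ∀ (name : String), Dom_detect_arch_py name → Spec_detect_arch_py name (detect_arch_py name)

-- ===== LEMMAS AND PROOFS =====

-- minimum of two optional priorities (none = no hit)
def pvOptMin : Option Nat → Option Nat → Option Nat
  | none, b => b
  | some x, none => some x
  | some x, some y => some (min x y)

theorem pvOptMin_none_left (b : Option Nat) : pvOptMin none b = b := rfl

theorem pvOptMin_none_right (a : Option Nat) : pvOptMin a none = a := by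
  cases a <;> rfl

theorem pvOptMin_assoc (a b c : Option Nat) :
    pvOptMin (pvOptMin a b) c = pvOptMin a (pvOptMin b c) := by
  cases a <;> cases b <;> cases c <;> simp [pvOptMin, Nat.min_assoc]

-- one keyword update of Source B's 'best' is a min with a single optional hit
theorem pvStep_elem (b : Option Nat) (p : Nat) (sw : Bool) :
    (if pvBetter b p && sw then some p else b) = pvOptMin b (if sw then some p else none) := by
  cases b <;> cases sw <;> simp [pvBetter, pvOptMin] <;> split_ifs <;> simp [Nat.min_def] <;> omega

-- folding min-updates starting from b = min of b with the fold from none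
theorem pvFoldl_optMin_shift {α : Type} (h : α → Option Nat) :
    ∀ (l : List α) (b : Option Nat),
      l.foldl (fun b x => pvOptMin b (h x)) b =
        pvOptMin b (l.foldl (fun b x => pvOptMin b (h x)) none) := by
  intro l
  induction l with
  | nil => intro b; simp [pvOptMin_none_right]
  | cons x l ih =>
      intro b
      simp only [List.foldl_cons]
      rw [ih (pvOptMin b (h x)), ih (pvOptMin none (h x)), pvOptMin_none_left,
        pvOptMin_assoc]

-- rearranging four optional minima (AC)
theorem pvOptMin_comm4 (a b c d : Option Nat) :
    pvOptMin (pvOptMin a b) (pvOptMin c d) = pvOptMin (pvOptMin a c) (pvOptMin b d) := by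
  cases a <;> cases b <;> cases c <;> cases d <;>
    simp [pvOptMin, Nat.min_def] <;> split_ifs <;> omega

-- pointwise-split folds: min over (pvOptMin of two hit functions) = min of the two mins
theorem pvFoldl_optMin_split {α : Type} (g₁ g₂ : α → Option Nat) :
    ∀ (l : List α),
      l.foldl (fun b x => pvOptMin b (pvOptMin (g₁ x) (g₂ x))) none =
        pvOptMin (l.foldl (fun b x => pvOptMin b (g₁ x)) none)
                 (l.foldl (fun b x => pvOptMin b (g₂ x)) none) := by
  intro l
  induction l with
  | nil => rfl
  | cons x l ih =>
      simp only [List.foldl_cons, pvOptMin_none_left]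
      rw [pvFoldl_optMin_shift (fun x => pvOptMin (g₁ x) (g₂ x)) l (pvOptMin (g₁ x) (g₂ x)),
        ih, pvFoldl_optMin_shift g₁ l (g₁ x), pvFoldl_optMin_shift g₂ l (g₂ x), pvOptMin_comm4]

-- global minimum priority over keywords occurring anywhere in l
def pvMinIn (l : List Char) : Option Nat :=
  pvKeywords.foldl (fun b kp => pvOptMin b (if PySem.Chars.isIn kp.1 l then some kp.2 else none)) none

theorem pvIsIn_cons (kw : List Char) (c : Char) (s : List Char) :
    PySem.Chars.isIn kw (c :: s) =
      (PySem.Chars.startswith (c :: s) kw || PySem.Chars.isIn kw s) := by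
  by_cases h : kw <:+: (c :: s)
  · rw [(PySem.Chars.isIn_iff_infix kw (c :: s)).2 h]
    rcases (List.infix_cons_iff).1 h with h' | h'
    · rw [(PySem.Chars.startswith_iff (c :: s) kw).2 h', Bool.true_or]
    · rw [(PySem.Chars.isIn_iff_infix kw s).2 h', Bool.or_true]
  · rw [(PySem.Chars.isIn_eq_false_iff kw (c :: s)).2 h]
    have h1 : ¬ kw <+: (c :: s) := fun hp => h ((List.infix_cons_iff).2 (Or.inl hp))
    have h2 : ¬ kw <:+: s := fun hi => h ((List.infix_cons_iff).2 (Or.inr hi))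
    have e1 : PySem.Chars.startswith (c :: s) kw = false := by
      cases hsw : PySem.Chars.startswith (c :: s) kw
      · rfl
      · exact absurd ((PySem.Chars.startswith_iff (c :: s) kw).1 hsw) h1
    rw [e1, (PySem.Chars.isIn_eq_false_iff kw s).2 h2, Bool.or_false]

theorem pvStep_eq (s : List Char) (b : Option Nat) :
    pvStep s b =
      pvOptMin b (pvKeywords.foldl
        (fun b kp => pvOptMin b (if PySem.Chars.startswith s kp.1 then some kp.2 else none)) none) := by
  unfold pvStep
  simp only [pvStep_elem]
  exact pvFoldl_optMin_shift _ pvKeywords b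

theorem pvMinIn_cons (c : Char) (s : List Char) :
    pvMinIn (c :: s) =
      pvOptMin (pvKeywords.foldl
          (fun b kp => pvOptMin b (if PySem.Chars.startswith (c :: s) kp.1 then some kp.2 else none)) none)
        (pvMinIn s) := by
  unfold pvMinIn
  rw [← pvFoldl_optMin_split
    (fun kp => if PySem.Chars.startswith (c :: s) kp.1 then some kp.2 else none)
    (fun kp => if PySem.Chars.isIn kp.1 s then some kp.2 else none) pvKeywords]
  have hf : (fun (b : Option Nat) (kp : List Char × Nat) =>
        pvOptMin b (if PySem.Chars.isIn kp.1 (c :: s) then some kp.2 else none)) =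
      (fun b kp => pvOptMin b
        (pvOptMin (if PySem.Chars.startswith (c :: s) kp.1 then some kp.2 else none)
                  (if PySem.Chars.isIn kp.1 s then some kp.2 else none))) := by
    funext b kp
    rw [pvIsIn_cons kp.1 c s]
    cases hsw : PySem.Chars.startswith (c :: s) kp.1 <;>
      cases hin : PySem.Chars.isIn kp.1 s <;> simp [pvOptMin]
  rw [hf]

-- proof-side view of Source B's outer loop: structural recursion over the suffixes
def pvScan : List Char → Option Nat → Option Nat
  | [], b => b
  | c :: s, b => pvScan s (pvStep (c :: s) b)

-- the index-driven foldl of the port equals the structural recursion over suffixes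
theorem pvRange_foldl_eq_scan_nat : ∀ (l : List Char) (b : Option Nat),
    (List.range l.length).foldl (fun acc k => pvStep (l.drop k) acc) b = pvScan l b := by
  intro l
  induction l with
  | nil => intro b; rfl
  | cons c s ih =>
      intro b
      simp only [List.length_cons]
      rw [List.range_succ_eq_map]
      simp only [List.foldl_cons, List.foldl_map, List.drop_zero, List.drop_succ_cons]
      exact ih (pvStep (c :: s) b)

theorem pvRange_foldl_eq_scan (l : List Char) (b : Option Nat) :
    (PySem.List.pyRange 0 (l.length : Int) 1).foldl (fun acc i => pvStep (l.drop i.toNat) acc) b =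
      pvScan l b := by
  rw [PySem.List.pyRange_one, ← pvRange_foldl_eq_scan_nat l b]
  simp [List.foldl_map]

theorem pvScan_eq (l : List Char) : ∀ b, pvScan l b = pvOptMin b (pvMinIn l) := by
  induction l with
  | nil =>
      intro b
      have : pvMinIn [] = none := by decide
      rw [this, pvOptMin_none_right]; rfl
  | cons c s ih =>
      intro b
      show pvScan s (pvStep (c :: s) b) = _
      rw [ih, pvStep_eq, pvMinIn_cons, pvOptMin_assoc]

-- lower bounds on the priorities occurring in an optional minimum
def pvGe (k : Nat) : Option Nat → Prop
  | none => True
  | some v => k ≤ v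

theorem pvGe_if (k j : Nat) (b : Bool) (h : k ≤ j) : pvGe k (if b then some j else none) := by
  cases b <;> simp [pvGe, h]

theorem pvGe_optMin (k : Nat) (x y : Option Nat) (hx : pvGe k x) (hy : pvGe k y) :
    pvGe k (pvOptMin x y) := by
  cases x <;> cases y <;> simp_all [pvGe, pvOptMin]

theorem pvOptMin_some_of_ge (k : Nat) (x : Option Nat) (h : pvGe k x) :
    pvOptMin (some k) x = some k := by
  cases x <;> simp_all [pvGe, pvOptMin]

-- one keyword of the minimum chain peels off as an if, given the tail's priorities are ≥ k
theorem pvStepChain (b : Bool) (k : Nat) (x : Option Nat) (h : pvGe k x) :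
    pvOptMin (if b then some k else none) x = if b then some k else x := by
  cases b
  · simp [pvOptMin_none_left]
  · simp [pvOptMin_some_of_ge k x h]

-- an if on a disjunction splits into two ifs
theorem pvIfOr {α : Type} (a b : Bool) (x y : α) :
    (if a || b then x else y) = if a then x else if b then x else y := by
  cases a <;> simp

-- the global minimum as the priority chain over group hits
theorem pvMinIn_chain (l : List Char) :
    pvMinIn l =
      (if PySem.Chars.isIn "aarch64".toList l || PySem.Chars.isIn "arm64".toList l then some 0
       else if PySem.Chars.isIn "x86_64".toList l || PySem.Chars.isIn "x86-64".toList l ||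
               PySem.Chars.isIn "amd64".toList l || PySem.Chars.isIn "x64".toList l ||
               PySem.Chars.isIn "win64".toList l then some 1
       else if PySem.Chars.isIn "ia32".toList l || PySem.Chars.isIn "i686".toList l ||
               PySem.Chars.isIn "i386".toList l || PySem.Chars.isIn "win32".toList l ||
               PySem.Chars.isIn "x86_32".toList l || PySem.Chars.isIn "32bit".toList l then some 2
       else if PySem.Chars.isIn "universal".toList l then some 3
       else if PySem.Chars.isIn "arm".toList l then some 4
       else none) := by
  unfold pvMinIn pvKeywords
  simp only [List.foldl_cons, List.foldl_nil, pvOptMin_none_left, pvOptMin_assoc]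
  rw [pvStepChain _ 0 _ (by repeat first | exact trivial | apply pvGe_optMin | (apply pvGe_if; omega))]
  rw [pvStepChain _ 0 _ (by repeat first | exact trivial | apply pvGe_optMin | (apply pvGe_if; omega))]
  rw [pvStepChain _ 1 _ (by repeat first | exact trivial | apply pvGe_optMin | (apply pvGe_if; omega))]
  rw [pvStepChain _ 1 _ (by repeat first | exact trivial | apply pvGe_optMin | (apply pvGe_if; omega))]
  rw [pvStepChain _ 1 _ (by repeat first | exact trivial | apply pvGe_optMin | (apply pvGe_if; omega))]
  rw [pvStepChain _ 1 _ (by repeat first | exact trivial | apply pvGe_optMin | (apply pvGe_if; omega))]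
  rw [pvStepChain _ 1 _ (by repeat first | exact trivial | apply pvGe_optMin | (apply pvGe_if; omega))]
  rw [pvStepChain _ 2 _ (by repeat first | exact trivial | apply pvGe_optMin | (apply pvGe_if; omega))]
  rw [pvStepChain _ 2 _ (by repeat first | exact trivial | apply pvGe_optMin | (apply pvGe_if; omega))]
  rw [pvStepChain _ 2 _ (by repeat first | exact trivial | apply pvGe_optMin | (apply pvGe_if; omega))]
  rw [pvStepChain _ 2 _ (by repeat first | exact trivial | apply pvGe_optMin | (apply pvGe_if; omega))]
  rw [pvStepChain _ 2 _ (by repeat first | exact trivial | apply pvGe_optMin | (apply pvGe_if; omega))]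
  rw [pvStepChain _ 2 _ (by repeat first | exact trivial | apply pvGe_optMin | (apply pvGe_if; omega))]
  rw [pvStepChain _ 3 _ (by repeat first | exact trivial | apply pvGe_optMin | (apply pvGe_if; omega))]
  simp only [pvIfOr]

-- ===== VERDICT (by name: the statement is the Claim_ definition above) =====
theorem detect_arch_py_spec : Claim_equal_detect_arch_py := by
  intro name _
  unfold Spec_detect_arch_py
  simp only [detect_arch_py, detect_arch_py_alt, PySem.Str.len_eq]
  rw [pvRange_foldl_eq_scan, pvScan_eq, pvOptMin_none_left, pvMinIn_chain]
  simp only [PySem.Str.isIn_eq, PySem.Str.toList_lower]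
  cases hg0 : (PySem.Chars.isIn "aarch64".toList (PySem.Chars.lower name.toList) ||
      PySem.Chars.isIn "arm64".toList (PySem.Chars.lower name.toList))
  case true => rfl
  cases h3 : PySem.Chars.isIn "x86_64".toList (PySem.Chars.lower name.toList) <;>
  cases h4 : PySem.Chars.isIn "x86-64".toList (PySem.Chars.lower name.toList) <;>
  cases h5 : PySem.Chars.isIn "amd64".toList (PySem.Chars.lower name.toList) <;>
  cases h6 : PySem.Chars.isIn "x64".toList (PySem.Chars.lower name.toList) <;>
  cases hg2 : (PySem.Chars.isIn "ia32".toList (PySem.Chars.lower name.toList) ||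
      PySem.Chars.isIn "i686".toList (PySem.Chars.lower name.toList) ||
      PySem.Chars.isIn "i386".toList (PySem.Chars.lower name.toList) ||
      PySem.Chars.isIn "win32".toList (PySem.Chars.lower name.toList) ||
      PySem.Chars.isIn "x86_32".toList (PySem.Chars.lower name.toList) ||
      PySem.Chars.isIn "32bit".toList (PySem.Chars.lower name.toList)) <;>
  cases h7 : PySem.Chars.isIn "win64".toList (PySem.Chars.lower name.toList) <;>
  cases hg3 : PySem.Chars.isIn "universal".toList (PySem.Chars.lower name.toList) <;>
  cases hg4 : PySem.Chars.isIn "arm".toList (PySem.Chars.lower name.toList) <;>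
  rfl
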